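-- pv_equiv track=rewrite | github.com/jean-bernard-laguerre/runtrack-python | jour4/job10.py | produitListe
-- ===== SOURCE A (Python) =====
-- def produitListe(liste):
--
--     produit = 0
--
--     for num in liste:
--
--         if 25 < num < 90:
--
--             if produit == 0:
--                 produit = num
--             else:
--                 produit *= num
--     return produit
-- ===== SOURCE B (Python) =====
-- def produitListe(liste):
--     counts = {}
--     for num in liste:
--         if 25 < num < 90:
--             counts[num] = counts.get(num, 0) + 1
--     if not counts:
--         return 0
--     produit = 1
--     for val, rep in counts.items():
--         produit *= val ** rep
--     return produit
-- ===== Notes on version B (the rewrite author's own statement) =====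
-- stated objective: alternative
-- what changed: B counts the multiplicity of each in-range value in a dict (one counting pass) and then multiplies val**rep over the distinct values only, instead of A's single 0-as-empty-sentinel running-product loop over every element.
import Mathlib
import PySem

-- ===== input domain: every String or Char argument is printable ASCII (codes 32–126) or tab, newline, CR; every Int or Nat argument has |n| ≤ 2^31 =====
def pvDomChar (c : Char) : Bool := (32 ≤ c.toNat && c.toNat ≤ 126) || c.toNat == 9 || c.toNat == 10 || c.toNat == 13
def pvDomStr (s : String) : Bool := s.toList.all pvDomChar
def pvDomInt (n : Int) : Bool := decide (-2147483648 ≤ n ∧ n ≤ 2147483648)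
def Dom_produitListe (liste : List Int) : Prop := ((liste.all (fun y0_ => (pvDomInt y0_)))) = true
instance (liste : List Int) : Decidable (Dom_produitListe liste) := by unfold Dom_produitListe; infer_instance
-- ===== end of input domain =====

-- B counts multiplicities of in-range values in a dict, then multiplies val^rep over the distinct values, instead of A's 0-sentinel running-product loop (alternative decomposition, same cost).


-- ===== PORT A =====
-- A: one loop; produit starts at 0, first in-range element replaces it, later ones multiply.
def produitListe (liste : List Int) : Int :=
  liste.foldl
    (fun produit num =>
      if 25 < num ∧ num < 90 then
        (if produit = 0 then num else produit * num)
      else produit)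
    0

-- ===== PORT B =====
-- B: counting pass into a dict (counts[num] = counts.get(num,0)+1), then 0 on empty dict,
-- else the product of val ** rep over the dict's items.  'val ** rep' is ported as
-- 'val ^ rep.toNat' — exact since every stored rep is a positive int.
def produitListe_alt (liste : List Int) : Int :=
  let counts : PySem.Dict Int Int :=
    liste.foldl
      (fun d num =>
        if 25 < num ∧ num < 90 then d.insert num (d.getD num 0 + 1) else d)
      PySem.Dict.empty
  if counts.items = [] then 0
  else counts.items.foldl (fun produit kv => produit * kv.1 ^ kv.2.toNat) 1

-- ===== PRECONDITION & SPEC =====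
def Spec_produitListe (liste : List Int) (out : Int) : Prop := out = produitListe_alt liste
instance (liste : List Int) (out : Int) : Decidable (Spec_produitListe liste out) := by unfold Spec_produitListe; infer_instance

-- ===== CLAIM =====
def Claim_equal_produitListe : Prop := ∀ (liste : List Int), Dom_produitListe liste → Spec_produitListe liste (produitListe liste)

-- ===== LEMMAS AND PROOFS =====

-- A's sentinel loop from a nonzero seed is that seed times the product of the in-range elements.
theorem pv_a_main (l : List Int) (p : Int) (hp : p ≠ 0) :
    l.foldl (fun produit num =>
      if 25 < num ∧ num < 90 then
        (if produit = 0 then num else produit * num)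
      else produit) p
    = p * (l.filter (fun x => decide (25 < x ∧ x < 90))).prod := by
  induction l generalizing p with
  | nil => simp
  | cons x t ih =>
    by_cases hx : 25 < x ∧ x < 90
    · obtain ⟨h1, h2⟩ := hx
      have hx0 : x ≠ 0 := by omega
      simp only [List.foldl_cons, List.filter_cons, h1, h2, and_self, if_true, hp, if_false,
        decide_true, List.prod_cons]
      rw [ih _ (mul_ne_zero hp hx0)]
      ring
    · simp only [List.foldl_cons, List.filter_cons, decide_eq_true_eq, hx, ite_false]
      exact ih p hp

-- A equals: 0 if no element is in range, else the product of the in-range elements.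
theorem pv_a_eq (l : List Int) :
    produitListe l
      = if l.filter (fun x => decide (25 < x ∧ x < 90)) = [] then 0
        else (l.filter (fun x => decide (25 < x ∧ x < 90))).prod := by
  induction l with
  | nil => simp [produitListe]
  | cons x t ih =>
    by_cases hx : 25 < x ∧ x < 90
    · obtain ⟨h1, h2⟩ := hx
      have hx0 : x ≠ 0 := by omega
      simp only [produitListe, List.foldl_cons, List.filter_cons, h1, h2, and_self, if_true,
        decide_true, List.prod_cons]
      rw [pv_a_main t x hx0, if_neg (by simp)]
    · simp only [produitListe, List.foldl_cons, List.filter_cons, decide_eq_true_eq, hx,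
        ite_false] at *
      exact ih

theorem pv_set_ofList_eq_nil {l : List Int} (h : PySem.Set.ofList l = []) : l = [] := by
  cases l with
  | nil => rfl
  | cons x t =>
    have hx : x ∈ PySem.Set.ofList (x :: t) := (PySem.Set.mem_ofList _ _).mpr List.mem_cons_self
    rw [h] at hx
    exact absurd hx List.not_mem_nil

theorem pv_toFinset_ofList (l : List Int) :
    (PySem.Set.ofList l).toFinset = l.toFinset := by
  ext a
  simp [PySem.Set.mem_ofList]

-- B's items product over the counter of l equals l.prod.
theorem pv_b_prod (l : List Int) :
    ((PySem.Set.ofList l).map (fun k => (k, (l.count k : Int)))).foldl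
      (fun produit kv => produit * kv.1 ^ kv.2.toNat) 1 = l.prod := by
  have h1 : ((PySem.Set.ofList l).map (fun k => (k, (l.count k : Int)))).foldl
      (fun produit kv => produit * kv.1 ^ kv.2.toNat) 1
      = ((PySem.Set.ofList l).map (fun k => k ^ l.count k)).prod := by
    rw [List.prod_eq_foldl, List.foldl_map, List.foldl_map]
    simp
  rw [h1, ← List.prod_toFinset (fun k => k ^ l.count k) (PySem.Set.nodup_ofList l),
    pv_toFinset_ofList, ← Finset.prod_list_count]

-- ===== VERDICT =====
theorem produitListe_spec : Claim_equal_produitListe := by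
  intro l _
  unfold Spec_produitListe produitListe_alt
  simp only [PySem.List.foldl_ite_eq_foldl_filter,
    PySem.Dict.foldl_insert_getD_add_one_eq_counter, PySem.Dict.items_counter]
  set f := l.filter (fun x => decide (25 < x ∧ x < 90)) with hf
  rw [pv_a_eq l, ← hf]
  by_cases hnil : f = []
  · simp [hnil]
  · rw [if_neg (by simpa using hnil), if_neg (fun h => hnil (pv_set_ofList_eq_nil (by simpa using h)))]
    exact (pv_b_prod f).symm
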